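-- pv_equiv track=rewrite | github.com/DeconBear/klynx | klynx/agent/tools/dispatch.py | _snippet_content_from_line_map
-- ===== SOURCE A (Python) =====
-- from typing import Any, Dict, List, Tuple
--
-- def _snippet_content_from_line_map(
--
--     line_map: Dict[int, str],
--     start_line: int,
--     end_line: int,
-- ) -> str:
--     lines: List[str] = []
--     for line_no in range(start_line, end_line + 1):
--         if line_no not in line_map:
--             continue
--         lines.append(f"{line_no:4d} | {line_map[line_no]}")
--     return "\n".join(lines)
-- ===== SOURCE B (Python) =====
-- def _snippet_content_from_line_map(line_map, start_line, end_line):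
--     keys = sorted(k for k in line_map if start_line <= k <= end_line)
--     return "\n".join(f"{k:4d} | {line_map[k]}" for k in keys)
-- ===== Notes on version B (the rewrite author's own statement) =====
-- stated objective: simpler
-- what changed: B iterates over the dict's own keys (filtered to the inclusive range, then sorted) instead of scanning the whole numeric range and testing membership, eliminating the skip branch.
import Mathlib
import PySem

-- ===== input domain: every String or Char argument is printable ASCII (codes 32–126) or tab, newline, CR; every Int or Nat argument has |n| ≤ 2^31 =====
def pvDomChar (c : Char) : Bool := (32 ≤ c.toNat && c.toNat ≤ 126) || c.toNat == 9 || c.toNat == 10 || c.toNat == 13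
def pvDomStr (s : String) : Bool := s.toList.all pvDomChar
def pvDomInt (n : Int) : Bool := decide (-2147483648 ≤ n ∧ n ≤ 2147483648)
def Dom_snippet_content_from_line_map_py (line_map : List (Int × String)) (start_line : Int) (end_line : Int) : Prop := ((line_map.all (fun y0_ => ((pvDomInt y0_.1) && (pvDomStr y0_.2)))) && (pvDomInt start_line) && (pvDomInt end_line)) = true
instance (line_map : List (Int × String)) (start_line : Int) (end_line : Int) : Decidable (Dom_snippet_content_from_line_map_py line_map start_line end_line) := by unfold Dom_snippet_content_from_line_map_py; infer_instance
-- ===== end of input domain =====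

-- B loops over the dict's own keys (filtered to the range, sorted) instead of scanning the
-- whole numeric range and testing membership; objective: simpler (no skip branch).

-- f"{n:4d} | {v}": str(n) right-aligned to width 4 with spaces, then " | ", then v.
-- Used by both ports (both Pythons contain this very f-string).
def pvFmtLine (n : Int) (v : String) : String :=
  String.ofList (List.replicate (4 - (PySem.Int.toChars n).length) ' ' ++
    PySem.Int.toChars n ++ (' ' :: '|' :: ' ' :: v.toList))

-- ===== PORT A =====
-- 'line_map[line_no]' is guarded by the contains test, so getD's default is never read.
def snippet_content_from_line_map_py (line_map : List (Int × String)) (start_line : Int) (end_line : Int) : String :=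
  PySem.Str.join "\n"
    ((PySem.List.pyRange start_line (end_line + 1)).foldl
      (fun acc n =>
        if (PySem.Dict.mk line_map).contains n then
          acc ++ [pvFmtLine n ((PySem.Dict.mk line_map).getD n "")]
        else acc)
      [])

-- ===== PORT B =====
-- 'for k in line_map' iterates the dict's (unique) keys: dedup of the association list's keys.
def snippet_content_from_line_map_py_alt (line_map : List (Int × String)) (start_line : Int) (end_line : Int) : String :=
  PySem.Str.join "\n"
    ((PySem.List.sorted
        ((PySem.List.dedup ((PySem.Dict.mk line_map).keys)).filter
          (fun k => decide (start_line ≤ k) && decide (k ≤ end_line)))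
        (fun k => k)).map
      (fun k => pvFmtLine k ((PySem.Dict.mk line_map).getD k "")))

-- ===== PRECONDITION & SPEC =====
def Spec_snippet_content_from_line_map_py (line_map : List (Int × String)) (start_line : Int) (end_line : Int) (out : String) : Prop := out = snippet_content_from_line_map_py_alt line_map start_line end_line
instance (line_map : List (Int × String)) (start_line : Int) (end_line : Int) (out : String) : Decidable (Spec_snippet_content_from_line_map_py line_map start_line end_line out) := by unfold Spec_snippet_content_from_line_map_py; infer_instance

-- ===== CLAIM (what is proved, stated in full; the proofs are below) =====
def Claim_equal_snippet_content_from_line_map_py : Prop := ∀ (line_map : List (Int × String)) (start_line : Int) (end_line : Int), Dom_snippet_content_from_line_map_py line_map start_line end_line → Spec_snippet_content_from_line_map_py line_map start_line end_line (snippet_content_from_line_map_py line_map start_line end_line)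

-- ===== LEMMAS AND PROOFS =====

-- range(a, b) with step 1 is strictly increasing
lemma pvPairwise_pyRange (a b : Int) : (PySem.List.pyRange a b).Pairwise (fun x y => x < y) := by
  simp only [PySem.List.pyRange]
  norm_num
  split_ifs
  · rw [List.pairwise_map]
    exact List.pairwise_lt_range.imp (by intro i j h; omega)
  · simp

-- the ascending scan of the range filtered by membership IS the sorted list of in-range keys
lemma pvKeys (lm : List (Int × String)) (s e : Int) :
    PySem.List.sorted
      ((PySem.List.dedup ((PySem.Dict.mk lm).keys)).filter
        (fun k => decide (s ≤ k) && decide (k ≤ e))) (fun k => k)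
    = (PySem.List.pyRange s (e + 1)).filter (fun n => (PySem.Dict.mk lm).contains n) := by
  apply PySem.List.sorted_eq_of_perm_of_pairwise_lt
  · rw [List.perm_ext_iff_of_nodup]
    · intro a
      simp only [List.mem_filter, PySem.List.mem_pyRange_one, PySem.List.mem_dedup,
        PySem.Dict.contains_iff_mem_keys, PySem.Dict.keys_mk, decide_eq_true_eq,
        Bool.and_eq_true]
      constructor
      · rintro ⟨⟨h1, h2⟩, hm⟩
        exact ⟨hm, h1, by omega⟩
      · rintro ⟨hm, h1, h2⟩
        exact ⟨⟨h1, by omega⟩, hm⟩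
    · exact ((pvPairwise_pyRange s (e + 1)).imp fun h => ne_of_lt h).filter _
    · exact (PySem.List.nodup_dedup _).filter _
  · exact (pvPairwise_pyRange s (e + 1)).filter _

-- ===== VERDICT (by name: the statement is the Claim_ definition above) =====
theorem snippet_content_from_line_map_py_spec : Claim_equal_snippet_content_from_line_map_py := by
  intro lm s e _
  unfold Spec_snippet_content_from_line_map_py
  unfold snippet_content_from_line_map_py snippet_content_from_line_map_py_alt
  rw [PySem.List.foldl_append_ite (p := fun n => (PySem.Dict.mk lm).contains n = true)
        (f := fun n => pvFmtLine n ((PySem.Dict.mk lm).getD n ""))]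
  rw [pvKeys]
  simp
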